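-- pv_equiv track=rewrite | github.com/quan12jiale/gspscript | source/dbscript/CppDependBroadcast.py | doIgnore
-- ===== SOURCE A (Python) =====
-- def doIgnore(count, authors, ignoreAuthors):
--     newCount = count - len(ignoreAuthors)
--     for author in list(authors.keys()):
--         ignoreCount = ignoreAuthors.count(author)
--         authors[author] = authors[author] - ignoreCount
--         if authors[author] <= 0:
--             newCount = newCount - authors[author]
--             del authors[author]
--     if newCount < 0:
--         newCount = 0
--     return newCount
-- ===== SOURCE B (Python) =====
-- def doIgnore(count, authors, ignoreAuthors):
--     ign = sorted(ignoreAuthors)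
--     newCount = count - len(ign)
--     i = 0
--     n = len(ign)
--     for key, val in sorted(authors.items()):
--         while i < n and ign[i] < key:
--             i += 1
--         start = i
--         while i < n and ign[i] == key:
--             i += 1
--         c = i - start
--         if val - c <= 0:
--             newCount -= val - c
--             del authors[key]
--         else:
--             authors[key] = val - c
--     return max(newCount, 0)
-- ===== Notes on version B (the rewrite author's own statement) =====
-- stated objective: faster
-- what changed: Replaces A's per-author ignoreAuthors.count scan over the unsorted list with a sort-then-merge: both ignoreAuthors and the author items are sorted and a single two-pointer sweep reads each author's ignore multiplicity as a run length, turning O(n*m) into O((n+m)log(n+m)).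
import Mathlib
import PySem

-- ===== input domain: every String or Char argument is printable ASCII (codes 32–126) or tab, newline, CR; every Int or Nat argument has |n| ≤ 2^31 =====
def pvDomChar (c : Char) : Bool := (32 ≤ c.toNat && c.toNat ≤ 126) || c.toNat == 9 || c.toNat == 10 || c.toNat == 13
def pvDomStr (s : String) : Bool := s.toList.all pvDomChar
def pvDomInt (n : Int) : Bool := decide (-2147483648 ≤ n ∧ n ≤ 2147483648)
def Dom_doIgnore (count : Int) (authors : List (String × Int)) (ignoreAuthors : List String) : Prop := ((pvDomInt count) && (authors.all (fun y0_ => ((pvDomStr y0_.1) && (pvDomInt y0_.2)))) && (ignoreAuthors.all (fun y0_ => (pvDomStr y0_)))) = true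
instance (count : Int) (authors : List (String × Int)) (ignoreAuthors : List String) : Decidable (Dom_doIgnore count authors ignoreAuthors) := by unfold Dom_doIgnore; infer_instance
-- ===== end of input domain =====

-- B replaces A's per-author ignoreAuthors.count scan by sorting both ignoreAuthors and the
-- author items and doing one two-pointer merge sweep (run lengths give the multiplicities);
-- both mutate the authors dict identically (checked in Python), the equivalence proved here
-- is about the return value.

-- ===== PORT A =====
def doIgnoreLoopA (ign : List String) : List String → PySem.Dict String Int → Int → Int
  | [], _, nc => nc
  | k :: ks, d, nc =>
      let v := d.getD k 0 - (PySem.List.count ign k : Int)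
      let d' := d.insert k v
      if v ≤ 0 then doIgnoreLoopA ign ks (d'.erase k) (nc - v)
      else doIgnoreLoopA ign ks d' nc

def doIgnore (count : Int) (authors : List (String × Int)) (ignoreAuthors : List String) : Int :=
  let d : PySem.Dict String Int := PySem.Dict.mk authors
  let newCount := count - (ignoreAuthors.length : Int)
  let r := doIgnoreLoopA ignoreAuthors d.keys d newCount
  if r < 0 then 0 else r

-- ===== PORT B =====
-- the two while loops advancing the pointer i over the sorted ign are the dropWhile/takeWhile
-- split of the remaining suffix; the run length (i - start) is that takeWhile's length
def doIgnoreMergeB : List (String × Int) → List String → Int → Int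
  | [], _, nc => nc
  | (k, v) :: rest, ign, nc =>
      let ign1 := ign.dropWhile (fun a => decide (a < k))
      let c : Int := ((ign1.takeWhile (fun a => a == k)).length : Int)
      let ign2 := ign1.dropWhile (fun a => a == k)
      if v - c ≤ 0 then doIgnoreMergeB rest ign2 (nc - (v - c))
      else doIgnoreMergeB rest ign2 nc

-- sorted(authors.items()) compares tuples, but dict keys are unique, so it is the key-sort
def doIgnore_alt (count : Int) (authors : List (String × Int)) (ignoreAuthors : List String) : Int :=
  let ign := PySem.List.sorted ignoreAuthors (fun x => x) false
  let items := PySem.List.sorted (PySem.Dict.mk authors).items (fun p => p.1) false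
  max (doIgnoreMergeB items ign (count - (ign.length : Int))) 0

-- ===== PRECONDITION & SPEC =====
-- Pre_ requires distinct author keys: the Python argument is a dict, which cannot carry
-- duplicate keys, so no input A accepts is excluded.
def Pre_doIgnore (_count : Int) (authors : List (String × Int)) (_ignoreAuthors : List String) : Prop :=
  (authors.map Prod.fst).Nodup
instance (count : Int) (authors : List (String × Int)) (ignoreAuthors : List String) : Decidable (Pre_doIgnore count authors ignoreAuthors) := by unfold Pre_doIgnore; infer_instance
def pvWitness_doIgnore : Int × (List (String × Int)) × List String :=
  (3, [("b", 1), ("a", 2)], ["a", "b", "a"])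

def Spec_doIgnore (count : Int) (authors : List (String × Int)) (ignoreAuthors : List String) (out : Int) : Prop := out = doIgnore_alt count authors ignoreAuthors
instance (count : Int) (authors : List (String × Int)) (ignoreAuthors : List String) (out : Int) : Decidable (Spec_doIgnore count authors ignoreAuthors out) := by unfold Spec_doIgnore; infer_instance

-- ===== CLAIM (what is proved, stated in full; the proofs are below) =====
def Claim_equal_doIgnore : Prop := ∀ (count : Int) (authors : List (String × Int)) (ignoreAuthors : List String), Dom_doIgnore count authors ignoreAuthors → Pre_doIgnore count authors ignoreAuthors → Spec_doIgnore count authors ignoreAuthors (doIgnore count authors ignoreAuthors)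

-- ===== LEMMAS AND PROOFS =====

-- erase at key k does not change lookups at k' ≠ k
theorem pv_find?_filter_ne {ν : Type} (k k' : String) (h : k' ≠ k) :
    ∀ (xs : List (String × ν)),
      (xs.filter (fun p => !p.1 == k)).find? (fun p => p.1 == k') = xs.find? (fun p => p.1 == k') := by
  intro xs
  induction xs with
  | nil => rfl
  | cons p xs ih =>
    by_cases hk : p.1 = k
    · subst hk
      have hk' : (p.1 == k') = false := by simp [beq_eq_false_iff_ne]; exact fun e => h e.symm
      simp [hk', ih]
    · have hpk : (!(p.1 == k)) = true := by simp [hk]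
      simp only [List.filter_cons, hpk, if_true]
      cases hpb : (p.1 == k') <;> simp [hpb, ih]

theorem pv_getD_erase_of_ne {ν : Type} (d : PySem.Dict String ν) (k k' : String) (dflt : ν)
    (h : k' ≠ k) : (d.erase k).getD k' dflt = d.getD k' dflt := by
  simp [PySem.Dict.erase, PySem.Dict.getD, PySem.Dict.get?, pv_find?_filter_ne k k' h]

-- A's loop computes a pure fold over the key list
theorem pv_loopA_eq (ign : List String) (g : String → Int) :
    ∀ (ks : List String) (d : PySem.Dict String Int) (nc : Int), ks.Nodup →
      (∀ k ∈ ks, d.getD k 0 = g k) →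
      doIgnoreLoopA ign ks d nc =
        ks.foldl (fun nc k =>
          if g k - (PySem.List.count ign k : Int) ≤ 0
          then nc - (g k - (PySem.List.count ign k : Int)) else nc) nc := by
  intro ks
  induction ks with
  | nil => intro d nc _ _; rfl
  | cons k ks ih =>
    intro d nc hnd hg
    have hk : d.getD k 0 = g k := hg k (List.mem_cons_self ..)
    have hrest : ∀ k' ∈ ks, k' ≠ k := by
      intro k' hk' e; subst e; exact (List.nodup_cons.mp hnd).1 hk'
    simp only [doIgnoreLoopA, hk, List.foldl_cons]
    by_cases hle : g k - (PySem.List.count ign k : Int) ≤ 0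
    · rw [if_pos hle, if_pos hle]
      apply ih _ _ (List.nodup_cons.mp hnd).2
      intro k' hk'
      rw [pv_getD_erase_of_ne _ _ _ _ (hrest k' hk'),
          PySem.Dict.getD_insert, if_neg (hrest k' hk')]
      exact hg k' (List.mem_cons_of_mem _ hk')
    · rw [if_neg hle, if_neg hle]
      apply ih _ _ (List.nodup_cons.mp hnd).2
      intro k' hk'
      rw [PySem.Dict.getD_insert, if_neg (hrest k' hk')]
      exact hg k' (List.mem_cons_of_mem _ hk')

-- dropping the sorted prefix strictly below k keeps sortedness, leaves only elements ≥ k,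
-- and preserves the count of every key ≥ k
theorem pv_dropLt (k : String) :
    ∀ (l : List String), l.Pairwise (· ≤ ·) →
      (l.dropWhile (fun a => decide (a < k))).Pairwise (· ≤ ·) ∧
      (∀ a ∈ l.dropWhile (fun a => decide (a < k)), k ≤ a) ∧
      (∀ k', k ≤ k' → (l.dropWhile (fun a => decide (a < k))).count k' = l.count k') := by
  intro l
  induction l with
  | nil => intro _; exact ⟨List.Pairwise.nil, by simp, by simp⟩
  | cons a t ih =>
    intro hp
    have ha : ∀ b ∈ t, a ≤ b := fun b hb => List.rel_of_pairwise_cons hp hb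
    have hpt : t.Pairwise (· ≤ ·) := hp.of_cons
    by_cases hlt : a < k
    · have hdec : decide (a < k) = true := decide_eq_true hlt
      have hd : (a :: t).dropWhile (fun a => decide (a < k)) =
          t.dropWhile (fun a => decide (a < k)) := by
        simp only [List.dropWhile_cons, hdec, if_true]
      obtain ⟨h1, h2, h3⟩ := ih hpt
      refine ⟨hd ▸ h1, hd ▸ h2, ?_⟩
      intro k' hkk'
      have hne : k' ≠ a := fun e => absurd (lt_of_lt_of_le hlt hkk') (by simp [e])
      rw [hd, h3 k' hkk', List.count_cons, if_neg (by simpa using hne.symm)]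
      omega
    · have hdec : decide (a < k) = false := decide_eq_false hlt
      have hd : (a :: t).dropWhile (fun a => decide (a < k)) = a :: t := by
        simp only [List.dropWhile_cons, hdec, Bool.false_eq_true, if_false]
      refine ⟨by rw [hd]; exact hp, ?_, by intro k' _; rw [hd]⟩
      rw [hd]
      intro x hx
      rcases List.mem_cons.mp hx with e | hx
      · exact e ▸ le_of_not_gt hlt
      · exact le_trans (le_of_not_gt hlt) (ha x hx)

-- on a sorted list all of whose elements are ≥ k, the leading run of k's is all the k's,
-- and dropping it preserves the count of every key > k
theorem pv_takeRun (k : String) :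
    ∀ (l : List String), l.Pairwise (· ≤ ·) → (∀ a ∈ l, k ≤ a) →
      (l.takeWhile (fun a => a == k)).length = l.count k ∧
      (l.dropWhile (fun a => a == k)).Pairwise (· ≤ ·) ∧
      (∀ k', k < k' → (l.dropWhile (fun a => a == k)).count k' = l.count k') := by
  intro l
  induction l with
  | nil => intro _ _; exact ⟨rfl, List.Pairwise.nil, by simp⟩
  | cons a t ih =>
    intro hp hge
    have ha : ∀ b ∈ t, a ≤ b := fun b hb => List.rel_of_pairwise_cons hp hb
    have hpt : t.Pairwise (· ≤ ·) := hp.of_cons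
    by_cases he : a = k
    · subst he
      have hget : ∀ b ∈ t, a ≤ b := ha
      obtain ⟨h1, h2, h3⟩ := ih hpt hget
      refine ⟨?_, ?_, ?_⟩
      · simp [h1, List.count_cons_self]
      · simpa [List.dropWhile_cons] using h2
      · intro k' hkk'
        have hne : k' ≠ a := (ne_of_lt hkk').symm
        simp only [List.dropWhile_cons, beq_self_eq_true, if_true]
        rw [h3 k' hkk', List.count_cons, if_neg (by simpa using hne.symm)]
        omega
    · have hgt : k < a := lt_of_le_of_ne (hge a (List.mem_cons_self ..)) (fun e => he e.symm)
      have hstop : (a == k) = false := by simp [he]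
      have hnok : k ∉ a :: t := by
        intro hk
        rcases List.mem_cons.mp hk with e | hk
        · exact he e.symm
        · exact absurd (lt_of_lt_of_le hgt (ha k hk)) (lt_irrefl k)
      refine ⟨?_, ?_, ?_⟩
      · simp [hstop, List.count_eq_zero.mpr hnok]
      · simpa [hstop] using hp
      · intro k' _; simp [hstop]

-- B's merge sweep is the pure fold over the items with the true multiplicities
theorem pv_merge_eq :
    ∀ (items : List (String × Int)) (ign : List String) (nc : Int),
      items.Pairwise (fun p q => p.1 < q.1) → ign.Pairwise (· ≤ ·) →
      doIgnoreMergeB items ign nc =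
        items.foldl (fun nc p =>
          if p.2 - (ign.count p.1 : Int) ≤ 0
          then nc - (p.2 - (ign.count p.1 : Int)) else nc) nc := by
  intro items
  induction items with
  | nil => intro ign nc _ _; rfl
  | cons p rest ih =>
    intro ign nc hpair hsort
    obtain ⟨k, v⟩ := p
    have hrest : ∀ q ∈ rest, k < q.1 := fun q hq => List.rel_of_pairwise_cons hpair hq
    obtain ⟨hs1, hge1, hc1⟩ := pv_dropLt k ign hsort
    obtain ⟨hlen, hs2, hc2⟩ := pv_takeRun k (ign.dropWhile (fun a => decide (a < k))) hs1 hge1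
    have hck : ((ign.dropWhile (fun a => decide (a < k))).takeWhile (fun a => a == k)).length
        = ign.count k := by rw [hlen, hc1 k le_rfl]
    have hcrest : ∀ q ∈ rest,
        ((ign.dropWhile (fun a => decide (a < k))).dropWhile (fun a => a == k)).count q.1
          = ign.count q.1 := by
      intro q hq
      rw [hc2 q.1 (hrest q hq), hc1 q.1 (le_of_lt (hrest q hq))]
    simp only [doIgnoreMergeB, hck, List.foldl_cons]
    have hfold : ∀ nc' : Int,
        doIgnoreMergeB rest ((ign.dropWhile (fun a => decide (a < k))).dropWhile (fun a => a == k)) nc'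
          = rest.foldl (fun nc p =>
              if p.2 - (ign.count p.1 : Int) ≤ 0
              then nc - (p.2 - (ign.count p.1 : Int)) else nc) nc' := by
      intro nc'
      rw [ih _ nc' hpair.of_cons hs2]
      apply PySem.List.foldl_congr_mem
      intro acc q hq
      rw [hcrest q hq]
    by_cases hle : v - (ign.count k : Int) ≤ 0
    · rw [if_pos hle, if_pos hle, hfold]
    · rw [if_neg hle, if_neg hle, hfold]

-- the common fold written as a sum over the list
theorem pv_fold_sum {α : Type} (g : α → Int) :
    ∀ (l : List α) (nc : Int),
      l.foldl (fun nc x => if g x ≤ 0 then nc - g x else nc) nc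
        = nc + (l.map (fun x => if g x ≤ 0 then -g x else 0)).sum := by
  intro l nc
  have h : (fun (nc : Int) (x : α) => if g x ≤ 0 then nc - g x else nc)
      = fun nc x => nc + (if g x ≤ 0 then -g x else 0) := by
    funext nc x; split_ifs <;> ring
  rw [h, PySem.List.foldl_add]

-- ===== VERDICT (by name: the statement is the Claim_ definition above) =====
theorem doIgnore_spec : Claim_equal_doIgnore := by
  intro count authors ign _ hpre
  simp only [Spec_doIgnore, doIgnore, doIgnore_alt]
  set d0 : PySem.Dict String Int := PySem.Dict.mk authors with hd0
  have hnd : d0.keys.Nodup := by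
    simpa [hd0, PySem.Dict.keys_mk] using hpre
  -- A's side as a sum
  have hA := pv_loopA_eq ign (fun k => d0.getD k 0) d0.keys d0 (count - (ign.length : Int)) hnd
    (fun _ _ => rfl)
  simp only [PySem.List.count_eq] at hA
  rw [hA, pv_fold_sum (fun k => d0.getD k 0 - (ign.count k : Int))]
  -- B's side as a sum
  set ign' := PySem.List.sorted ign (fun x => x) false with hign'
  set items := PySem.List.sorted d0.items (fun p : String × Int => p.1) false with hitems
  have hpermI : items.Perm d0.items := PySem.List.sorted_perm ..
  have hpermG : ign'.Perm ign := PySem.List.sorted_perm ..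
  have hsortG : ign'.Pairwise (· ≤ ·) := by
    simpa using PySem.List.sorted_pairwise ign (fun x => x)
  have hndI : (items.map Prod.fst).Nodup := by
    rw [List.Perm.nodup_iff (List.Perm.map Prod.fst hpermI)]
    exact hnd
  have hpairI : items.Pairwise (fun p q : String × Int => p.1 < q.1) := by
    have hle : items.Pairwise (fun p q : String × Int => p.1 ≤ q.1) :=
      PySem.List.sorted_pairwise d0.items (fun p => p.1)
    have hne : items.Pairwise (fun p q : String × Int => p.1 ≠ q.1) :=
      List.pairwise_map.mp hndI
    exact (hle.and hne).imp (fun h => lt_of_le_of_ne h.1 h.2)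
  rw [pv_merge_eq items ign' _ hpairI hsortG]
  have hcnt : ∀ (a : String), ign'.count a = ign.count a := fun a => List.Perm.count_eq hpermG a
  have hlen' : ign'.length = ign.length := hpermG.length_eq
  simp only [hcnt, hlen']
  rw [pv_fold_sum (fun p : String × Int => p.2 - (ign.count p.1 : Int))]
  -- the two sums are over a permutation of the same values
  have hmapeq :
      (d0.items.map (fun p : String × Int =>
        if p.2 - (ign.count p.1 : Int) ≤ 0 then -(p.2 - (ign.count p.1 : Int)) else 0))
      = d0.keys.map (fun k =>
        if d0.getD k 0 - (ign.count k : Int) ≤ 0 then -(d0.getD k 0 - (ign.count k : Int)) else 0) := by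
    simp only [PySem.Dict.keys, List.map_map]
    apply List.map_congr_left
    intro p hp
    obtain ⟨k0, v0⟩ := p
    have : d0.getD k0 0 = v0 := PySem.Dict.getD_of_mem_items d0 hp hnd 0
    simp [Function.comp, this]
  have hsum :
      (items.map (fun p : String × Int =>
        if p.2 - (ign.count p.1 : Int) ≤ 0 then -(p.2 - (ign.count p.1 : Int)) else 0)).sum
      = (d0.items.map (fun p : String × Int =>
        if p.2 - (ign.count p.1 : Int) ≤ 0 then -(p.2 - (ign.count p.1 : Int)) else 0)).sum :=
    List.Perm.sum_eq (List.Perm.map _ hpermI)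
  rw [hsum, hmapeq]
  omega
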